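-- pv_equiv track=rewrite | github.com/pypi-data/pypi-mirror-374 | packages/kst-instruct-following/kst_instruct_following-0.2.0.tar.gz/kst_instruct_following-0.2.0/kst_instruct_following/similarity_duplicator.py | get_all_cluster_res
-- ===== SOURCE A (Python) =====
-- from collections import Counter
--
-- def get_all_cluster_res(whole_cluster_data, preprocess_data):
--     """
--     根据聚类结果生成最终数据
--
--     Args:
--         whole_cluster_data: 聚类结果
--         preprocess_data: 原始数据
--
--     Returns:
--         no_repeat_data: 去重后的数据
--     """
--     whole_cluster_data_count = Counter(whole_cluster_data)
--     cluster_data = []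
--     for cluster_id, nums in whole_cluster_data_count.items():
--         if cluster_id != -1 and nums > 1:
--             object_idx = [idx for idx, j in enumerate(whole_cluster_data) if j == cluster_id]
--             object_sentence = [preprocess_data[i] for i in object_idx]
--             cluster_data.append(object_sentence)
--         else:
--             object_idx = [idx for idx, j in enumerate(whole_cluster_data) if j == cluster_id]
--             object_sentence = [preprocess_data[i] for i in object_idx]
--             for sentence in object_sentence:
--                     cluster_data.append([sentence])
--     return cluster_data
-- ===== SOURCE B (Python) =====
-- def get_all_cluster_res(whole_cluster_data, preprocess_data):
--     # One pass to group sentences by cluster id, then one pass over the data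
--     # emitting each id's block at its first occurrence (O(n) instead of O(k*n)).
--     groups = {}
--     for idx, cid in enumerate(whole_cluster_data):
--         groups.setdefault(cid, []).append(preprocess_data[idx])
--     cluster_data = []
--     emitted = set()
--     for cid in whole_cluster_data:
--         if cid in emitted:
--             continue
--         emitted.add(cid)
--         sentences = groups[cid]
--         if cid != -1 and len(sentences) > 1:
--             cluster_data.append(sentences)
--         else:
--             for sentence in sentences:
--                 cluster_data.append([sentence])
--     return cluster_data
-- ===== Notes on version B (the rewrite author's own statement) =====
-- stated objective: faster
-- what changed: A rescans the whole cluster list once per distinct id (Counter items loop with an inner full-list comprehension); B builds an id->sentences dict in one pass and then emits each id's block at its first occurrence while walking the data once, tracking emitted ids in a set.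
import Mathlib
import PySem

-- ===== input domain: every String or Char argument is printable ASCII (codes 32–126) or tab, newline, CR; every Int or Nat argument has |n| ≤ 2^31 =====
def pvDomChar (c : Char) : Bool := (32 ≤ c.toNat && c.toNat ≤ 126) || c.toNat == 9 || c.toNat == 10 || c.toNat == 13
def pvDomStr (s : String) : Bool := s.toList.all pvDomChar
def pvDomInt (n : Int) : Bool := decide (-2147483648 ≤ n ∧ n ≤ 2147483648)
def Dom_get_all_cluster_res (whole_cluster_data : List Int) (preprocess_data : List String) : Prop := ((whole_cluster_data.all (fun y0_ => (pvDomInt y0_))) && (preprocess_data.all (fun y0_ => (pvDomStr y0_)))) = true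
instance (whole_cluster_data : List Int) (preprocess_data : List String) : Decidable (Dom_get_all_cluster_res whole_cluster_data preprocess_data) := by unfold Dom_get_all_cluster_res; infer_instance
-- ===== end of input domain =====

-- B groups the sentences by cluster id in ONE pass over the data and then emits each id's
-- block at its first occurrence, instead of A's rescan of the whole list for every id.

-- ===== PORT A =====
def get_all_cluster_res (whole_cluster_data : List Int) (preprocess_data : List String) : List (List String) :=
  let whole_cluster_data_count := PySem.Dict.counter whole_cluster_data
  whole_cluster_data_count.items.foldl (fun cluster_data p =>
    if p.1 ≠ -1 ∧ p.2 > 1 then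
      let object_idx := ((PySem.List.enumerate whole_cluster_data).filter (fun q => q.2 == p.1)).map (fun q => q.1)
      let object_sentence := object_idx.map (fun i => PySem.List.pyGetD preprocess_data i "")
      cluster_data ++ [object_sentence]
    else
      let object_idx := ((PySem.List.enumerate whole_cluster_data).filter (fun q => q.2 == p.1)).map (fun q => q.1)
      let object_sentence := object_idx.map (fun i => PySem.List.pyGetD preprocess_data i "")
      object_sentence.foldl (fun acc sentence => acc ++ [[sentence]]) cluster_data) []

-- ===== PORT B =====
-- groups = {}; for idx, cid in enumerate(whole_cluster_data): groups.setdefault(cid, []).append(preprocess_data[idx])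
def pvGroups (whole_cluster_data : List Int) (preprocess_data : List String) : PySem.Dict Int (List String) :=
  (PySem.List.enumerate whole_cluster_data).foldl
    (fun d p => d.modify p.2 [] (· ++ [PySem.List.pyGetD preprocess_data p.1 ""])) PySem.Dict.empty

def get_all_cluster_res_alt (whole_cluster_data : List Int) (preprocess_data : List String) : List (List String) :=
  let groups := pvGroups whole_cluster_data preprocess_data
  (whole_cluster_data.foldl (fun (st : List (List String) × PySem.Set Int) cid =>
      if PySem.Set.contains st.2 cid then st
      else
        let sentences := groups.getD cid []
        ((if cid ≠ -1 ∧ sentences.length > 1 then st.1 ++ [sentences]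
          else sentences.foldl (fun acc sentence => acc ++ [[sentence]]) st.1),
         PySem.Set.add st.2 cid))
    ([], PySem.Set.empty)).1

-- ===== PRECONDITION & SPEC =====
-- A raises IndexError on preprocess_data[idx] exactly when the sentence list is shorter
-- than the cluster list; those inputs are excluded (B raises there too).
def Pre_get_all_cluster_res (whole_cluster_data : List Int) (preprocess_data : List String) : Prop :=
  whole_cluster_data.length ≤ preprocess_data.length
instance (whole_cluster_data : List Int) (preprocess_data : List String) : Decidable (Pre_get_all_cluster_res whole_cluster_data preprocess_data) := by unfold Pre_get_all_cluster_res; infer_instance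

def pvWitness_get_all_cluster_res : List Int × List String := ([1, 1, -1, 2], ["a", "b", "c", "d"])

def Spec_get_all_cluster_res (whole_cluster_data : List Int) (preprocess_data : List String) (out : List (List String)) : Prop := out = get_all_cluster_res_alt whole_cluster_data preprocess_data
instance (whole_cluster_data : List Int) (preprocess_data : List String) (out : List (List String)) : Decidable (Spec_get_all_cluster_res whole_cluster_data preprocess_data out) := by unfold Spec_get_all_cluster_res; infer_instance

-- ===== CLAIM (what is proved, stated in full; the proofs are below) =====
def Claim_equal_get_all_cluster_res : Prop := ∀ (whole_cluster_data : List Int) (preprocess_data : List String), Dom_get_all_cluster_res whole_cluster_data preprocess_data → Pre_get_all_cluster_res whole_cluster_data preprocess_data → Spec_get_all_cluster_res whole_cluster_data preprocess_data (get_all_cluster_res whole_cluster_data preprocess_data)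

-- ===== LEMMAS AND PROOFS =====

-- the sentences of one cluster id, in data order
def pvSents (whole_cluster_data : List Int) (preprocess_data : List String) (c : Int) : List String :=
  ((PySem.List.enumerate whole_cluster_data).filter (fun q => q.2 == c)).map
    (fun q => PySem.List.pyGetD preprocess_data q.1 "")

-- the block both programs emit for one cluster id
def pvBlock (whole_cluster_data : List Int) (preprocess_data : List String) (c : Int) : List (List String) :=
  if c ≠ -1 ∧ (whole_cluster_data.count c : Int) > 1
  then [pvSents whole_cluster_data preprocess_data c]
  else (pvSents whole_cluster_data preprocess_data c).map (fun s => [s])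

-- the ids of l not in seen, first occurrences in order
def pvFresh (seen : PySem.Set Int) : List Int → List Int
  | [] => []
  | x :: t => if PySem.Set.contains seen x then pvFresh seen t
              else x :: pvFresh (PySem.Set.add seen x) t

lemma pvFresh_spec (l : List Int) : ∀ seen : PySem.Set Int,
    PySem.Set.update seen l = seen ++ pvFresh seen l := by
  induction l with
  | nil => intro seen; simp [pvFresh, PySem.Set.update]
  | cons x t ih =>
    intro seen
    have hstep : PySem.Set.update seen (x :: t) = PySem.Set.update (PySem.Set.add seen x) t := by
      simp [PySem.Set.update]
    by_cases h : PySem.Set.contains seen x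
    · have hadd : PySem.Set.add seen x = seen := by rw [PySem.Set.add, if_pos h]
      rw [hstep, hadd, ih, pvFresh, if_pos h]
    · have hadd : PySem.Set.add seen x = seen ++ [x] := by rw [PySem.Set.add, if_neg h]
      rw [hstep, ih, pvFresh, if_neg h, hadd]
      simp

lemma pvGroups_getD (wcd : List Int) (pd : List String) (c : Int) :
    (pvGroups wcd pd).getD c [] = pvSents wcd pd c := by
  unfold pvGroups pvSents
  rw [show (PySem.List.enumerate wcd).foldl
      (fun d p => d.modify p.2 [] (· ++ [PySem.List.pyGetD pd p.1 ""])) PySem.Dict.empty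
    = ((PySem.List.enumerate wcd).map (fun p => (p.2, PySem.List.pyGetD pd p.1 ""))).foldl
      (fun d q => d.modify q.1 [] (· ++ [q.2])) PySem.Dict.empty from by rw [List.foldl_map]]
  rw [PySem.Dict.getD_foldl_modify_append]
  simp [List.filter_map, Function.comp_def]

lemma pvSents_length (wcd : List Int) (pd : List String) (c : Int) :
    (pvSents wcd pd c).length = wcd.count c := by
  unfold pvSents
  rw [List.length_map, ← List.countP_eq_length_filter]
  suffices h : ∀ (s : Int), (PySem.List.enumerate wcd s).countP (fun q => q.2 == c) = wcd.count c by
    exact h 0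
  induction wcd with
  | nil => intro s; simp [PySem.List.enumerate_nil]
  | cons x t ih =>
    intro s
    rw [PySem.List.enumerate_cons, List.countP_cons, List.count_cons, ih]

lemma portA_eq (wcd : List Int) (pd : List String) :
    get_all_cluster_res wcd pd = (PySem.Set.ofList wcd).flatMap (pvBlock wcd pd) := by
  simp only [get_all_cluster_res]
  rw [PySem.Dict.items_counter, List.foldl_map]
  rw [PySem.List.foldl_congr_mem _ _ (fun acc k => acc ++ pvBlock wcd pd k) _ ?_]
  · rw [PySem.List.foldl_append_eq_flatMap]; simp
  · intro acc k _
    show (if k ≠ -1 ∧ (wcd.count k : Int) > 1 then _ else _) = acc ++ pvBlock wcd pd k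
    unfold pvBlock
    by_cases h : k ≠ -1 ∧ (wcd.count k : Int) > 1
    · rw [if_pos h, if_pos h]
      simp [pvSents, Function.comp_def]
    · rw [if_neg h, if_neg h]
      rw [PySem.List.foldl_append_singleton_eq_map]
      simp [pvSents, Function.comp_def]

lemma portB_loop (wcd : List Int) (pd : List String) (l : List Int) :
    ∀ (acc : List (List String)) (seen : PySem.Set Int),
    (l.foldl (fun (st : List (List String) × PySem.Set Int) cid =>
      if PySem.Set.contains st.2 cid then st
      else
        ((if cid ≠ -1 ∧ ((pvGroups wcd pd).getD cid []).length > 1 then st.1 ++ [(pvGroups wcd pd).getD cid []]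
          else ((pvGroups wcd pd).getD cid []).foldl (fun acc sentence => acc ++ [[sentence]]) st.1),
         PySem.Set.add st.2 cid)) (acc, seen)).1
    = acc ++ (pvFresh seen l).flatMap (pvBlock wcd pd) := by
  induction l with
  | nil => intro acc seen; simp [pvFresh]
  | cons x t ih =>
    intro acc seen
    rw [List.foldl_cons, pvFresh]
    by_cases h : PySem.Set.contains seen x
    · rw [if_pos h]
      simp only [h, if_pos]
      exact ih acc seen
    · rw [if_neg h]
      simp only [h, Bool.false_eq_true, if_false]
      rw [ih _ (PySem.Set.add seen x), List.flatMap_cons, ← List.append_assoc]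
      congr 1
      rw [pvGroups_getD]
      unfold pvBlock
      by_cases h2 : x ≠ -1 ∧ (wcd.count x : Int) > 1
      · rw [if_pos h2, if_pos]
        exact ⟨h2.1, by rw [pvSents_length]; exact_mod_cast h2.2⟩
      · rw [if_neg h2, if_neg, PySem.List.foldl_append_singleton_eq_map]
        intro hc
        exact h2 ⟨hc.1, by rw [pvSents_length] at hc; exact_mod_cast hc.2⟩

lemma portB_eq (wcd : List Int) (pd : List String) :
    get_all_cluster_res_alt wcd pd = (pvFresh [] wcd).flatMap (pvBlock wcd pd) := by
  simp only [get_all_cluster_res_alt]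
  exact portB_loop wcd pd wcd [] PySem.Set.empty

-- ===== VERDICT (by name: the statement is the Claim_ definition above) =====
theorem get_all_cluster_res_spec : Claim_equal_get_all_cluster_res := by
  intro wcd pd _ _
  unfold Spec_get_all_cluster_res
  rw [portA_eq, portB_eq]
  have h := pvFresh_spec wcd ([] : PySem.Set Int)
  rw [show pvFresh [] wcd = PySem.Set.ofList wcd from by
    rw [PySem.Set.ofList_eq_foldl]
    simpa [PySem.Set.update] using h.symm]
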